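-- pv_equiv track=rewrite | github.com/cosyfluf/CosBit-AR | modem.py | _interleave_bits
-- ===== SOURCE A (Python) =====
-- def _interleave_bits(bits):
--     cols = 8
--     rows = len(bits) // cols
--     interleaved = ""
--     for c in range(cols):
--         for r in range(rows):
--             interleaved += bits[r * cols + c]
--     return interleaved
-- ===== SOURCE B (Python) =====
-- def _interleave_bits(bits):
--     rows = len(bits) // 8
--     chunks = [bits[i * 8:(i + 1) * 8] for i in range(rows)]
--     return ''.join(''.join(col) for col in zip(*chunks))
-- ===== Notes on version B (the rewrite author's own statement) =====
-- stated objective: idiomatic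
-- what changed: Replaces A's flat r*8+c index arithmetic with nested loops and per-character string += by chunking into 8-character rows and transposing with zip(*chunks), joining the columns.
import Mathlib
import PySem

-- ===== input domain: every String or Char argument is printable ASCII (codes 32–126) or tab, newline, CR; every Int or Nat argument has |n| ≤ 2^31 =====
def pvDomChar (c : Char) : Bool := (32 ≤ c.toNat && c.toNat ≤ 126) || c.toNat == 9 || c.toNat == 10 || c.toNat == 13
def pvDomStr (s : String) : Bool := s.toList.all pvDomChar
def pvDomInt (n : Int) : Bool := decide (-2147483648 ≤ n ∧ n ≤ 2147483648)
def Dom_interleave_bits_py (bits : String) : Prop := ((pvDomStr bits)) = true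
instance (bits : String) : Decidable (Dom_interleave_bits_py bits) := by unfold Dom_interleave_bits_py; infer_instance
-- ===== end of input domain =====

-- B replaces A's flat index arithmetic with an explicit chunk-into-rows + zip-transpose (idiomatic; same O(n) work).

-- ===== PORT A =====
-- literal port of A's nested index loops; the index r*8+c is always in range
-- (r < len//8, c < 8), so Python never raises and pyGetD's default is never used
def interleave_bits_py (bits : String) : String :=
  let l := bits.toList
  let cols : Int := 8
  let rows : Int := PySem.Int.floordiv (PySem.Str.len bits) cols
  String.ofList <|
    (PySem.List.pyRange 0 cols 1).foldl (fun acc c =>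
      (PySem.List.pyRange 0 rows 1).foldl (fun acc r =>
        acc ++ [PySem.List.pyGetD l (r * cols + c) ' ']) acc) []

-- ===== PORT B =====
-- Python's zip(*ls) over a list of lists: columns until the shortest list is
-- exhausted; zip() of no iterables is empty.  Exact for any list of lists.
def pyZipGo {α : Type} : Nat → List (List α) → List (List α)
  | 0, _ => []
  | n + 1, ls =>
    if ls.any (·.isEmpty) then []
    else ls.filterMap (·.head?) :: pyZipGo n (ls.map (·.tail))

def pyZipN {α : Type} (ls : List (List α)) : List (List α) :=
  match ls with
  | [] => []
  | l0 :: rest => pyZipGo l0.length (l0 :: rest)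

-- literal port of Source B: chunk into full 8-character rows, transpose with zip,
-- join the columns ( ''.join of ''.join(col) is the flatten of the columns )
def interleave_bits_py_alt (bits : String) : String :=
  let l := bits.toList
  let rows := l.length / 8
  let chunks := (List.range rows).map
    (fun (i : Nat) => PySem.List.slice l (some ((i : Int) * 8)) (some (((i : Int) + 1) * 8)))
  String.ofList (pyZipN chunks).flatten

-- ===== PRECONDITION & SPEC =====
def Spec_interleave_bits_py (bits : String) (out : String) : Prop := out = interleave_bits_py_alt bits
instance (bits : String) (out : String) : Decidable (Spec_interleave_bits_py bits out) := by unfold Spec_interleave_bits_py; infer_instance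

-- ===== CLAIM (what is proved, stated in full; the proofs are below) =====
def Claim_equal_interleave_bits_py : Prop := ∀ (bits : String), Dom_interleave_bits_py bits → Spec_interleave_bits_py bits (interleave_bits_py bits)

-- ===== LEMMAS AND PROOFS =====

-- the common column-major character list both programs produce
def pvColMajor (l : List Char) : List Char :=
  (List.range 8).flatMap (fun c => (List.range (l.length / 8)).map (fun r => l.getD (r * 8 + c) ' '))

lemma filterMap_head?_of_nonempty {α : Type} (ls : List (List α)) (d : α)
    (h : ∀ l ∈ ls, l ≠ []) :
    ls.filterMap (·.head?) = ls.map (fun l => l.getD 0 d) := by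
  induction ls with
  | nil => rfl
  | cons x xs ih =>
    have hx := h x (by simp)
    cases x with
    | nil => exact absurd rfl hx
    | cons a t =>
      simp [ih (fun l hl => h l (by simp [hl]))]

lemma pyZipGo_eq {α : Type} (d : α) :
    ∀ (n : Nat) (ls : List (List α)), (∀ l ∈ ls, l.length = n) →
      pyZipGo n ls = (List.range n).map (fun c => ls.map (fun l => l.getD c d)) := by
  intro n
  induction n with
  | zero => intro ls _; rfl
  | succ n ih =>
    intro ls h
    have hne : ∀ l ∈ ls, l ≠ [] := by
      intro l hl hnil
      have := h l hl; simp [hnil] at this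
    have hany : ls.any (·.isEmpty) = false := by
      simp only [List.any_eq_false]
      intro l hl; simpa [List.isEmpty_iff] using hne l hl
    have htails : ∀ l ∈ ls.map (·.tail), l.length = n := by
      intro l hl
      rcases List.mem_map.mp hl with ⟨t, ht, rfl⟩
      have := h t ht
      cases t with
      | nil => simp at this
      | cons a ts => simpa using this
    rw [pyZipGo, if_neg (by simp [hany]), ih _ htails,
        filterMap_head?_of_nonempty ls d hne, List.range_succ_eq_map]
    simp only [List.map_cons, List.map_map]
    congr 1
    apply List.map_congr_left
    intro c _
    simp only [Function.comp_apply]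
    apply List.map_congr_left
    intro l hl
    rcases List.exists_cons_of_ne_nil (hne l hl) with ⟨a, t, rfl⟩
    simp

lemma pyZipN_eq {α : Type} (d : α) (n : Nat) (ls : List (List α)) (hne : ls ≠ [])
    (h : ∀ l ∈ ls, l.length = n) :
    pyZipN ls = (List.range n).map (fun c => ls.map (fun l => l.getD c d)) := by
  cases ls with
  | nil => exact absurd rfl hne
  | cons l0 rest =>
    have h0 : l0.length = n := h l0 (by simp)
    rw [pyZipN, h0]
    exact pyZipGo_eq d n (l0 :: rest) h

-- chunk i of l, for i < l.length / 8: the slice is a full row of 8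
lemma chunk_eq (l : List Char) (i : Nat) :
    PySem.List.slice l (some ((i : Int) * 8)) (some (((i : Int) + 1) * 8)) =
      (l.drop (i * 8)).take 8 := by
  rw [PySem.List.slice_toNat l (by positivity) (by positivity),
      show (((i : Int) + 1) * 8).toNat - ((i : Int) * 8).toNat = 8 from by omega,
      show ((i : Int) * 8).toNat = i * 8 from by omega]

lemma chunk_length (l : List Char) (i : Nat) (hi : i < l.length / 8) :
    ((l.drop (i * 8)).take 8).length = 8 := by
  simp; omega

lemma chunk_getD (l : List Char) (i c : Nat) (hi : i < l.length / 8) (hc : c < 8) :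
    ((l.drop (i * 8)).take 8).getD c ' ' = l.getD (i * 8 + c) ' ' := by
  have hlen : i * 8 + c < l.length := by omega
  have h1 : c < ((l.drop (i * 8)).take 8).length := by rw [chunk_length l i hi]; exact hc
  rw [List.getD_eq_getElem _ _ h1, List.getD_eq_getElem _ _ hlen]
  simp [List.getElem_take, List.getElem_drop]

-- A's nested appending loops build the flatMap of the column maps
lemma foldl_nested {β : Type} (cs : List β) (rs : List β) (g : β → β → Char)
    (init : List Char) :
    cs.foldl (fun acc c => rs.foldl (fun acc r => acc ++ [g c r]) acc) init
      = init ++ cs.flatMap (fun c => rs.map (g c)) := by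
  induction cs generalizing init with
  | nil => simp
  | cons c cs ih =>
    simp only [List.foldl_cons, List.flatMap_cons]
    rw [PySem.List.foldl_append_singleton_eq_map, ih, List.append_assoc]

-- A computes the column-major list
lemma A_eq (bits : String) : interleave_bits_py bits = String.ofList (pvColMajor bits.toList) := by
  have hlen : PySem.Str.len bits = (bits.toList.length : Int) := by
    simp [PySem.Str.len_eq]
  have hrows : PySem.Int.floordiv (PySem.Str.len bits) 8 = ((bits.toList.length / 8 : Nat) : Int) := by
    rw [hlen]; exact_mod_cast PySem.Int.floordiv_natCast bits.toList.length 8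
  have hget : ∀ (r c : Nat),
      PySem.List.pyGetD bits.toList ((r : Int) * 8 + (c : Int)) ' ' =
        bits.toList.getD (r * 8 + c) ' ' := by
    intro r c
    rw [show ((r : Int) * 8 + (c : Int)) = ((r * 8 + c : Nat) : Int) by push_cast; ring,
        PySem.List.pyGetD_natCast]
  simp only [interleave_bits_py, pvColMajor, hrows, PySem.List.pyRange_zero,
    Int.toNat_natCast, List.foldl_map, hget]
  rw [show ((8 : Int)).toNat = 8 by rfl]
  rw [foldl_nested (List.range 8) (List.range (bits.toList.length / 8))
        (fun c r => bits.toList.getD (r * 8 + c) ' ') []]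
  simp

-- B computes the column-major list
lemma B_eq (bits : String) : interleave_bits_py_alt bits = String.ofList (pvColMajor bits.toList) := by
  simp only [interleave_bits_py_alt, pvColMajor]
  by_cases h : bits.toList.length / 8 = 0
  · have h' : bits.length / 8 = 0 := by simpa using h
    simp [h', pyZipN]
  · have hpos : 0 < bits.toList.length / 8 := Nat.pos_of_ne_zero h
    have hch : (List.range (bits.toList.length / 8)).map
          (fun (i : Nat) => PySem.List.slice bits.toList (some ((i : Int) * 8)) (some (((i : Int) + 1) * 8)))
        = (List.range (bits.toList.length / 8)).map
          (fun (i : Nat) => (bits.toList.drop (i * 8)).take 8) := by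
      apply List.map_congr_left
      intro i _
      exact chunk_eq bits.toList i
    rw [hch]
    rw [pyZipN_eq ' ' 8 _ (by simp only [ne_eq, List.map_eq_nil_iff, List.range_eq_nil]; omega)
          (by intro t ht
              rcases List.mem_map.mp ht with ⟨i, hi, rfl⟩
              exact chunk_length bits.toList i (List.mem_range.mp hi))]
    congr 1
    have hcol : ∀ c, c < 8 →
        ((List.range (bits.toList.length / 8)).map
            (fun i => (bits.toList.drop (i * 8)).take 8)).map (fun l => l.getD c ' ')
          = (List.range (bits.toList.length / 8)).map
            (fun r => bits.toList.getD (r * 8 + c) ' ') := by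
      intro c hc
      rw [List.map_map]
      apply List.map_congr_left
      intro i hi
      exact chunk_getD bits.toList i c (List.mem_range.mp hi) hc
    rw [List.map_congr_left (fun c hc => hcol c (List.mem_range.mp hc))]
    simp [List.flatMap_def]

-- ===== VERDICT (by name: the statement is the Claim_ definition above) =====
theorem interleave_bits_py_spec : Claim_equal_interleave_bits_py := by
  intro bits _
  unfold Spec_interleave_bits_py
  rw [A_eq, B_eq]
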